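-- pv_equiv track=rewrite | github.com/samuelpswang/advent-of-code-2015 | day_11/part_2.py | is_valid_3
-- ===== SOURCE A (Python) =====
-- from itertools import groupby
--
-- def is_valid_3(pwd):
--     count = 0
--     for key, group in groupby(pwd):
--         if len(list(group)) >= 2:
--             count += 1
--         if count == 2:
--             return True
--     return False
-- ===== SOURCE B (Python) =====
-- def is_valid_3(pwd):
--     count = 0
--     prev = False
--     for i in range(len(pwd) - 1):
--         if pwd[i] == pwd[i + 1] and not prev:
--             count += 1
--             if count == 2:
--                 return True
--             prev = True
--         else:
--             prev = pwd[i] == pwd[i + 1]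
--     return False
-- ===== Notes on version B (the rewrite author's own statement) =====
-- stated objective: simpler
-- what changed: Replaced itertools.groupby plus per-group list materialisation with a single direct scan of adjacent positions maintaining a boolean flag so each run of equal characters is counted once.
import Mathlib
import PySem

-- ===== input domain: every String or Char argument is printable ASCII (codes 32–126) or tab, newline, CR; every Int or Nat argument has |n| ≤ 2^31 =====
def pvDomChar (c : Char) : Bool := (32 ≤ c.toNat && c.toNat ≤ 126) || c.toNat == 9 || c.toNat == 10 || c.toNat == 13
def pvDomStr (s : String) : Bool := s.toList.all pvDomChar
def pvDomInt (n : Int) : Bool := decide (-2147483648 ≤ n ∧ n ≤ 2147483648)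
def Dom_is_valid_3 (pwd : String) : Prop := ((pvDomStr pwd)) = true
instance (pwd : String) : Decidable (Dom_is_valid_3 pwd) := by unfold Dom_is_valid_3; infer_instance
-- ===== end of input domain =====

-- B drops itertools.groupby for a direct adjacent-position scan with a run flag (simpler, same cost).

-- ===== PORT A =====
-- groupby(pwd): split the character list into maximal runs of equal characters
def addRun (c : Char) : List (List Char) → List (List Char)
  | (d :: g) :: gs => if c == d then (c :: d :: g) :: gs else [c] :: (d :: g) :: gs
  | gs => [c] :: gs

def runs (l : List Char) : List (List Char) := l.foldr addRun []

-- the for-loop of A over the groups: count groups of length >= 2, return True at count == 2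
def loopA : List (List Char) → Nat → Bool
  | [], _ => false
  | g :: gs, count =>
    let count' := if g.length ≥ 2 then count + 1 else count
    if count' == 2 then true else loopA gs count'

def is_valid_3 (pwd : String) : Bool := loopA (runs pwd.toList) 0

-- ===== PORT B =====
-- scan adjacent pairs; prev = "previous pair matched" so each run is counted once
def loopB : List Char → Bool → Nat → Bool
  | a :: b :: rest, prev, count =>
    if a == b && !prev then
      if count + 1 == 2 then true else loopB (b :: rest) true (count + 1)
    else loopB (b :: rest) (a == b) count
  | _, _, _ => false

def is_valid_3_alt (pwd : String) : Bool := loopB pwd.toList false 0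

-- ===== PRECONDITION & SPEC =====
def Spec_is_valid_3 (pwd : String) (out : Bool) : Prop := out = is_valid_3_alt pwd
instance (pwd : String) (out : Bool) : Decidable (Spec_is_valid_3 pwd out) := by unfold Spec_is_valid_3; infer_instance

-- ===== CLAIM (what is proved, stated in full; the proofs are below) =====
def Claim_equal_is_valid_3 : Prop := ∀ (pwd : String), Dom_is_valid_3 pwd → Spec_is_valid_3 pwd (is_valid_3 pwd)

-- ===== LEMMAS AND PROOFS =====

-- characterisation of the first run produced by groupby
lemma runs_cons (c : Char) (l : List Char) :
    runs (c :: l)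
      = (c :: l.takeWhile (fun x => x == c)) :: runs (l.dropWhile (fun x => x == c)) := by
  induction l generalizing c with
  | nil => simp [runs, addRun]
  | cons d t ih =>
    show addRun c (runs (d :: t)) = _
    rw [ih d]
    by_cases h : c = d
    · subst h
      simp [addRun, List.takeWhile, List.dropWhile]
    · have hb : (c == d) = false := by simp [h]
      have hb' : (d == c) = false := by simp [Ne.symm h]
      simp [addRun, hb, List.takeWhile, List.dropWhile, hb', ih d]

-- joint invariant: A's group loop vs B's adjacent scan (with the run flag state)
lemma main : ∀ (n : Nat) (l : List Char), l.length ≤ n →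
    (∀ count : Nat, count < 2 → loopA (runs l) count = loopB l false count) ∧
    (∀ (c : Char) (count : Nat), count < 2 →
      loopB (c :: l) true count = loopA (runs (l.dropWhile (fun x => x == c))) count) := by
  intro n
  induction n with
  | zero =>
    intro l hl
    have : l = [] := by cases l <;> simp_all
    subst this
    constructor
    · intro count h; simp [runs, loopA, loopB]
    · intro c count h; simp [runs, loopA, loopB]
  | succ n ih =>
    intro l hl
    cases l with
    | nil =>
      constructor
      · intro count h; simp [runs, loopA, loopB]
      · intro c count h; simp [runs, loopA, loopB]
    | cons b rest =>
      have hrest : rest.length ≤ n := by simp at hl; omega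
      have hP : ∀ count : Nat, count < 2 → loopA (runs (b :: rest)) count = loopB (b :: rest) false count := by
        intro count hc
        cases rest with
        | nil =>
          have : ¬ (count = 2) := by omega
          simp [runs, addRun, loopA, loopB, this]
        | cons b2 r2 =>
          have hr2 : r2.length ≤ n := by simp at hrest; omega
          rw [runs_cons]
          by_cases hb : b = b2
          · subst hb
            have ht : List.takeWhile (fun x => x == b) (b :: r2) = b :: List.takeWhile (fun x => x == b) r2 := by
              simp [List.takeWhile]
            have hd : List.dropWhile (fun x => x == b) (b :: r2) = List.dropWhile (fun x => x == b) r2 := by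
              simp [List.dropWhile]
            rw [ht, hd]
            by_cases h2 : count + 1 = 2
            · simp [loopA, loopB, h2]
            · have hlt : count + 1 < 2 := by omega
              have hn1 : count ≠ 1 := by omega
              simp only [loopA, loopB]
              simp [hn1, ((ih r2 hr2).2 b (count + 1) hlt).symm]
          · have hbb : (b == b2) = false := by simp [hb]
            have hbb2 : (b2 == b) = false := by simp [Ne.symm hb]
            have ht : List.takeWhile (fun x => x == b) (b2 :: r2) = [] := by
              simp [List.takeWhile, hbb2]
            have hd : List.dropWhile (fun x => x == b) (b2 :: r2) = b2 :: r2 := by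
              simp [List.dropWhile, hbb2]
            have hne : ¬ (count = 2) := by omega
            rw [ht, hd]
            simp only [loopA, loopB, hbb]
            simp [hne, (ih (b2 :: r2) hrest).1 count hc]
      refine ⟨hP, ?_⟩
      intro c count hc
      by_cases hcb : c = b
      · subst hcb
        have hd : List.dropWhile (fun x => x == c) (c :: rest) = List.dropWhile (fun x => x == c) rest := by
          simp [List.dropWhile]
        rw [hd]
        simp only [loopB]
        simp [(ih rest hrest).2 c count hc]
      · have hbb : (c == b) = false := by simp [hcb]
        have hbc : (b == c) = false := by simp [Ne.symm hcb]
        have hd : List.dropWhile (fun x => x == c) (b :: rest) = b :: rest := by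
          simp [List.dropWhile, hbc]
        rw [hd]
        simp only [loopB, hbb]
        simp [hP count hc]

-- ===== VERDICT (by name: the statement is the Claim_ definition above) =====
theorem is_valid_3_spec : Claim_equal_is_valid_3 := by
  intro pwd _
  show is_valid_3 pwd = is_valid_3_alt pwd
  exact (main pwd.toList.length pwd.toList le_rfl).1 0 (by omega)
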